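-- pv_equiv track=rewrite | github.com/DhinaGS-7194/hash-agile-interview-projects- | hash_agile_interview/sql injection/test1.py | check
-- ===== SOURCE A (Python) =====
-- def check(username, password):
--     keywords=[
--     "CREATE", "DROP", "ALTER", "TRUNCATE", "RENAME", "COMMENT",
--     "INSERT", "UPDATE", "DELETE", "MERGE", "CALL",
--     "GRANT", "REVOKE",
--     "COMMIT", "ROLLBACK", "SAVEPOINT",
--     "SELECT", "FROM", "WHERE", "GROUP", "HAVING", "ORDER", "LIMIT", "OFFSET",
--     "UNION", "INTERSECT", "EXCEPT",
--     "JOIN", "INNER", "LEFT", "RIGHT", "FULL", "CROSS",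
--     "IN", "NOT IN", "EXISTS", "NOT EXISTS",
--     "AND", "OR", "NOT", "IS NULL", "IS NOT NULL", "LIKE", "ILIKE", "SIMILAR TO",
--     "BETWEEN", "ANY", "ALL", "SOME", "DISTINCT",
--
--     "+", "-", "*", "/", "%", "**", "//",
--     "=", "!=", "<", ">", "<=", ">=",
--     ":=", "=",
--     "&", "|", "^", "~", "<<", ">>",
--     "(", ")", "[", "]", "{", "}", ",", ";","--"
--     ]
--     for keyword in keywords:
--         if keyword in username or keyword in password:
--             return True
--     return False
-- ===== SOURCE B (Python) =====
-- # B: reduce A's keyword list to its minimal elements under the substring order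
-- # (if k2 is a substring of k1, any hit on k1 is already a hit on k2), split them
-- # into single operator characters (checked by one character-class pass) and the
-- # remaining word keywords (checked by substring scans).
-- _OP_CHARS = frozenset("+-*/%=<>&|^~()[]{},;")
--
-- _WORDS = [
--     "CREATE", "DROP", "ALTER", "TRUNCATE", "RENAME", "COMMENT",
--     "UPDATE", "DELETE", "MERGE", "GRANT", "REVOKE", "COMMIT",
--     "ROLLBACK", "SELECT", "FROM", "WHERE", "GROUP", "LIMIT",
--     "OFFSET", "UNION", "EXCEPT", "LEFT", "RIGHT", "FULL", "CROSS",
--     "IN", "EXISTS", "AND", "OR", "NOT", "IS NULL", "LIKE",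
--     "SIMILAR TO", "BETWEEN", "ANY", "ALL", "SOME",
-- ]
--
-- def _suspicious(s):
--     return any(c in _OP_CHARS for c in s) or any(w in s for w in _WORDS)
--
-- def check(username, password):
--     return _suspicious(username) or _suspicious(password)
-- ===== Notes on version B (the rewrite author's own statement) =====
-- stated objective: alternative
-- what changed: A scans both strings once per each of ~75 keywords with an early return; B first reduces the keyword set to its minimal elements under the substring order (correct because a hit on a longer keyword is always a hit on a contained one), then tests the 20 single-character operators with one character-class pass per string and only the 37 remaining word keywords by substring scan.
import Mathlib
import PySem

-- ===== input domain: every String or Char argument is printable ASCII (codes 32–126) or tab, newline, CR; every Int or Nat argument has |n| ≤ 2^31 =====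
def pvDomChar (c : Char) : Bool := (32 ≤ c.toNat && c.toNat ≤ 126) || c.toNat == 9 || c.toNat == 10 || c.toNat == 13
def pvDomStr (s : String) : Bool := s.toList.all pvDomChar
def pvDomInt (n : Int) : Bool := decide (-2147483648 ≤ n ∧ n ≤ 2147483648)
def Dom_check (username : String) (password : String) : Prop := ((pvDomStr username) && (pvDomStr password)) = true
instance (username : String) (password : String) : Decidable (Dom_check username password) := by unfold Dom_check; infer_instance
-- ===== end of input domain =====

-- B replaces A's one-substring-scan-per-keyword loop by a reduction of the keyword set to
-- its minimal elements under the substring order: one character-class pass for the 20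
-- single operator characters plus substring scans for the 37 remaining word keywords.

-- ===== PORT A =====
-- A's literal keyword list (duplicates kept, e.g. "=" appears twice).
def kwsA : List String := [
  "CREATE", "DROP", "ALTER", "TRUNCATE", "RENAME", "COMMENT",
  "INSERT", "UPDATE", "DELETE", "MERGE", "CALL",
  "GRANT", "REVOKE",
  "COMMIT", "ROLLBACK", "SAVEPOINT",
  "SELECT", "FROM", "WHERE", "GROUP", "HAVING", "ORDER", "LIMIT", "OFFSET",
  "UNION", "INTERSECT", "EXCEPT",
  "JOIN", "INNER", "LEFT", "RIGHT", "FULL", "CROSS",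
  "IN", "NOT IN", "EXISTS", "NOT EXISTS",
  "AND", "OR", "NOT", "IS NULL", "IS NOT NULL", "LIKE", "ILIKE", "SIMILAR TO",
  "BETWEEN", "ANY", "ALL", "SOME", "DISTINCT",
  "+", "-", "*", "/", "%", "**", "//",
  "=", "!=", "<", ">", "<=", ">=",
  ":=", "=",
  "&", "|", "^", "~", "<<", ">>",
  "(", ")", "[", "]", "{", "}", ",", ";", "--"]

-- A's for-loop with early return: try each keyword ('in' = substring test, PySem.Str.isIn).
def checkLoopA (username : String) (password : String) : List String → Bool
  | [] => false
  | k :: rest =>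
      if PySem.Str.isIn k username || PySem.Str.isIn k password then true
      else checkLoopA username password rest

def check (username : String) (password : String) : Bool :=
  checkLoopA username password kwsA

-- ===== PORT B =====
-- B's operator-character set (frozenset of chars) and reduced word-keyword list.
def opCharsB : List Char :=
  ['+', '-', '*', '/', '%', '=', '<', '>', '&', '|', '^', '~',
   '(', ')', '[', ']', '{', '}', ',', ';']

def wordsB : List String := [
  "CREATE", "DROP", "ALTER", "TRUNCATE", "RENAME", "COMMENT",
  "UPDATE", "DELETE", "MERGE", "GRANT", "REVOKE", "COMMIT",
  "ROLLBACK", "SELECT", "FROM", "WHERE", "GROUP", "LIMIT",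
  "OFFSET", "UNION", "EXCEPT", "LEFT", "RIGHT", "FULL", "CROSS",
  "IN", "EXISTS", "AND", "OR", "NOT", "IS NULL", "LIKE",
  "SIMILAR TO", "BETWEEN", "ANY", "ALL", "SOME"]

-- any(c in _OP_CHARS for c in s) or any(w in s for w in _WORDS)
def suspiciousB (s : String) : Bool :=
  s.toList.any (fun c => opCharsB.contains c) || wordsB.any (fun w => PySem.Str.isIn w s)

def check_alt (username : String) (password : String) : Bool :=
  suspiciousB username || suspiciousB password

-- ===== PRECONDITION & SPEC =====
def Spec_check (username : String) (password : String) (out : Bool) : Prop := out = check_alt username password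
instance (username : String) (password : String) (out : Bool) : Decidable (Spec_check username password out) := by unfold Spec_check; infer_instance

-- ===== CLAIM (what is proved, stated in full; the proofs are below) =====
def Claim_equal_check : Prop := ∀ (username : String) (password : String), Dom_check username password → Spec_check username password (check username password)

-- ===== LEMMAS AND PROOFS =====

-- A's loop is an 'any' over the keyword list.
theorem checkLoopA_eq_any (u p : String) (kws : List String) :
    checkLoopA u p kws = kws.any (fun k => PySem.Str.isIn k u || PySem.Str.isIn k p) := by
  induction kws with
  | nil => rfl
  | cons k rest ih =>
      rw [checkLoopA, List.any_cons]
      cases (PySem.Str.isIn k u || PySem.Str.isIn k p) <;>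
        simp only [ih] <;> rfl

-- a single character is an infix exactly when it is a member
theorem singleton_infix_iff (c : Char) (l : List Char) : [c] <:+: l ↔ c ∈ l := by
  constructor
  · intro h; exact h.subset (List.mem_singleton_self c)
  · intro h
    obtain ⟨t1, t2, rfl⟩ := List.append_of_mem h
    exact ⟨t1, t2, by simp⟩

-- each operator character, as a one-character string, is one of A's keywords
theorem fact_ops_in_kwsA :
    (opCharsB.all (fun c => kwsA.any (fun k => k.toList == [c]))) = true := by decide

-- each of B's word keywords is one of A's keywords
theorem fact_words_in_kwsA : (wordsB.all (fun w => kwsA.contains w)) = true := by decide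

-- every keyword of A either contains an operator character or contains one of B's words
theorem fact_kwsA_covered :
    (kwsA.all (fun k => k.toList.any (fun c => opCharsB.contains c)
        || wordsB.any (fun w => PySem.Chars.isIn w.toList k.toList))) = true := by decide

-- B's per-string test ↔ some keyword of A is a substring (A's per-string test)
theorem suspiciousB_iff (s : String) :
    suspiciousB s = true ↔ ∃ k ∈ kwsA, PySem.Str.isIn k s = true := by
  unfold suspiciousB
  simp only [Bool.or_eq_true, List.any_eq_true]
  constructor
  · rintro (⟨c, hc, hop⟩ | ⟨w, hw, hin⟩)
    · have h1 := List.all_eq_true.mp fact_ops_in_kwsA c (by simpa using hop)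
      obtain ⟨k, hk, hkc⟩ := List.any_eq_true.mp h1
      refine ⟨k, hk, ?_⟩
      rw [PySem.Str.isIn_iff_infix, beq_iff_eq.mp hkc]
      exact (singleton_infix_iff c s.toList).mpr hc
    · have h2 := List.all_eq_true.mp fact_words_in_kwsA w hw
      exact ⟨w, by simpa using h2, hin⟩
  · rintro ⟨k, hk, hin⟩
    have hcov := List.all_eq_true.mp fact_kwsA_covered k hk
    simp only [Bool.or_eq_true] at hcov
    have hinf : k.toList <:+: s.toList := (PySem.Str.isIn_iff_infix _ _).mp hin
    rcases hcov with hop | hwd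
    · obtain ⟨c, hck, hcop⟩ := List.any_eq_true.mp hop
      exact Or.inl ⟨c, hinf.subset hck, hcop⟩
    · obtain ⟨w, hw, hwk⟩ := List.any_eq_true.mp hwd
      refine Or.inr ⟨w, hw, ?_⟩
      rw [PySem.Str.isIn_iff_infix]
      exact ((PySem.Chars.isIn_iff_infix _ _).mp hwk).trans hinf

-- ===== VERDICT (by name: the statement is the Claim_ definition above) =====
theorem check_spec : Claim_equal_check := by
  intro u p _
  show check u p = check_alt u p
  rw [Bool.eq_iff_iff, check, checkLoopA_eq_any, check_alt]
  simp only [Bool.or_eq_true, List.any_eq_true, suspiciousB_iff]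
  constructor
  · rintro ⟨k, hk, h | h⟩
    · exact Or.inl ⟨k, hk, h⟩
    · exact Or.inr ⟨k, hk, h⟩
  · rintro (⟨k, hk, h⟩ | ⟨k, hk, h⟩)
    · exact ⟨k, hk, Or.inl h⟩
    · exact ⟨k, hk, Or.inr h⟩
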